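-- pv_equiv track=rewrite | github.com/Wookie1/agent-kicad-pipeline | pcb-pipeline/schematic_preflight.py | _check_paren_balance
-- ===== SOURCE A (Python) =====
-- def _check_paren_balance(text: str) -> int:
--     """Return net parenthesis depth. 0 = balanced. Nonzero = malformed file."""
--     depth = 0
--     in_string = False
--     escape_next = False
--     for ch in text:
--         if escape_next:
--             escape_next = False
--             continue
--         if ch == '\\' and in_string:
--             escape_next = True
--             continue
--         if ch == '"':
--             in_string = not in_string
--             continue
--         if in_string:
--             continue
--         if ch == '(':
--             depth += 1
--         elif ch == ')':
--             depth -= 1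
--     return depth
-- ===== SOURCE B (Python) =====
-- def _check_paren_balance(text: str) -> int:
--     """Return net parenthesis depth. 0 = balanced. Nonzero = malformed file."""
--     # Pass 1: strip string literals (with escape handling); pass 2: count parens.
--     chunks = []
--     i = 0
--     n = len(text)
--     while i < n:
--         ch = text[i]
--         if ch == '"':
--             i += 1
--             while i < n and text[i] != '"':
--                 i += 2 if text[i] == '\\' else 1
--             i += 1
--         else:
--             chunks.append(ch)
--             i += 1
--     cleaned = ''.join(chunks)
--     return cleaned.count('(') - cleaned.count(')')
-- ===== Notes on version B (the rewrite author's own statement) =====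
-- stated objective: alternative
-- what changed: A's single per-character state machine with in_string/escape_next flags is replaced by a two-pass strip-then-count decomposition: one pass removes string literals (an inner loop skips each literal, handling escapes), then the result is str.count('(') - str.count(')').
import Mathlib
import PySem

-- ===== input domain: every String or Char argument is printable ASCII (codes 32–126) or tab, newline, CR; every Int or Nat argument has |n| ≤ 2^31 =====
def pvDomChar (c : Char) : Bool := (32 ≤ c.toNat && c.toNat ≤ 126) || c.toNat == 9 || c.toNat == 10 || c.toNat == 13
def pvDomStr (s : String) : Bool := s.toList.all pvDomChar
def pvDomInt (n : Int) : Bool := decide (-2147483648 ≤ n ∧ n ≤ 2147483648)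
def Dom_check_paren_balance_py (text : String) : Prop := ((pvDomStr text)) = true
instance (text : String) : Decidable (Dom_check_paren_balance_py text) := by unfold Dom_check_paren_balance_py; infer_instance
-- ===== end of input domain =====

-- B strips string literals in a first pass and then counts parentheses on the
-- cleaned text (strip-then-count decomposition), replacing A's per-character
-- flag state machine; alternative, same cost.


-- ===== PORT A =====
-- one step of A's loop; the state is (depth, in_string, escape_next)
def pvStepA (s : Int × Bool × Bool) (ch : Char) : Int × Bool × Bool :=
  if s.2.2 then (s.1, s.2.1, false)
  else if ch = '\\' ∧ s.2.1 = true then (s.1, s.2.1, true)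
  else if ch = '"' then (s.1, !s.2.1, s.2.2)
  else if s.2.1 then s
  else if ch = '(' then (s.1 + 1, s.2.1, s.2.2)
  else if ch = ')' then (s.1 - 1, s.2.1, s.2.2)
  else s

def check_paren_balance_py (text : String) : Int :=
  (text.toList.foldl pvStepA (0, false, false)).1

-- ===== PORT B =====
-- B's inner while loop: we stand just after an opening quote; return the
-- suffix just after the matching closing quote ([] if unterminated).
def pvSkipStr : List Char → List Char
  | [] => []
  | c :: rest =>
    if c = '"' then rest
    else if c = '\\' then
      match rest with
      | [] => []
      | _ :: r => pvSkipStr r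
    else pvSkipStr rest

-- needed by pvClean's decreasing_by
theorem pvSkipStr_length_le (l : List Char) : (pvSkipStr l).length ≤ l.length := by
  induction l using pvSkipStr.induct with
  | case1 => exact le_rfl
  | case2 r => rw [pvSkipStr.eq_def]; simp
  | case3 h => rw [pvSkipStr.eq_def]; simp
  | case4 head r h ih => rw [pvSkipStr.eq_def]; simp; omega
  | case5 head r h1 h2 ih => rw [pvSkipStr.eq_def]; simp [h1, h2]; omega

-- B's outer while loop: collect the characters outside string literals.
def pvClean : List Char → List Char
  | [] => []
  | c :: rest =>
    if c = '"' then pvClean (pvSkipStr rest) else c :: pvClean rest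
termination_by l => l.length
decreasing_by
  · exact Nat.lt_succ_of_le (pvSkipStr_length_le rest)
  · simp

def check_paren_balance_py_alt (text : String) : Int :=
  let cleaned := String.ofList (pvClean text.toList)
  (PySem.Str.count cleaned "(" : Int) - (PySem.Str.count cleaned ")" : Int)

-- ===== PRECONDITION & SPEC =====
def Spec_check_paren_balance_py (text : String) (out : Int) : Prop := out = check_paren_balance_py_alt text
instance (text : String) (out : Int) : Decidable (Spec_check_paren_balance_py text out) := by unfold Spec_check_paren_balance_py; infer_instance

-- ===== CLAIM (what is proved, stated in full; the proofs are below) =====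
def Claim_equal_check_paren_balance_py : Prop := ∀ (text : String), Dom_check_paren_balance_py text → Spec_check_paren_balance_py text (check_paren_balance_py text)

-- ===== LEMMAS AND PROOFS =====

-- single-character s.count(c) is List.count (PySem has no lemma for the 1-char case)
theorem pvCountGo_singleton (c : Char) (l : List Char) (fuel : Nat) (acc : Nat)
    (h : l.length ≤ fuel) : PySem.Chars.count.go [c] fuel l acc = acc + l.count c := by
  induction fuel generalizing l acc with
  | zero =>
    cases l with
    | nil => simp [PySem.Chars.count.go]
    | cons a t => simp at h
  | succ n ih =>
    cases l with
    | nil => simp [PySem.Chars.count.go]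
    | cons a t =>
      simp only [List.length_cons] at h
      by_cases hc : a = c
      · subst hc
        simp [PySem.Chars.count.go, List.isPrefixOf, ih t _ (by omega)]
        omega
      · have hpre : ¬ ([c].isPrefixOf (a :: t) = true) := by
          simp [List.isPrefixOf]; intro hh; exact hc hh.symm
        simp only [PySem.Chars.count.go, hpre, Bool.false_eq_true, if_false]
        rw [ih t acc (by omega), List.count_cons]
        simp [hc]

theorem pvStrCount_singleton (l : List Char) (c : Char) :
    PySem.Str.count (String.ofList l) (String.ofList [c]) = l.count c := by
  rw [PySem.Str.count_eq]
  simp only [String.toList_ofList]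
  unfold PySem.Chars.count
  simp [pvCountGo_singleton c l l.length 0 le_rfl]

-- A's loop, while in_string holds (escape_next clear), changes nothing but the
-- position and leaves the string exactly where pvSkipStr jumps to.
theorem pvInString (l : List Char) (d : Int) :
    (l.foldl pvStepA (d, true, false)).1 =
      ((pvSkipStr l).foldl pvStepA (d, false, false)).1 := by
  induction l using pvSkipStr.induct with
  | case1 => rfl
  | case2 r => rw [pvSkipStr.eq_def]; simp [pvStepA]
  | case3 h => rw [pvSkipStr.eq_def]; simp [pvStepA]
  | case4 head r h ih =>
    rw [pvSkipStr.eq_def]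
    simpa [pvStepA] using ih
  | case5 head r h1 h2 ih =>
    rw [pvSkipStr.eq_def]
    simpa [pvStepA, h1, h2] using ih

-- main invariant: A's running depth from the out-of-string state is the paren
-- count of B's cleaned text.
theorem pvMain (l : List Char) : ∀ d : Int,
    (l.foldl pvStepA (d, false, false)).1 =
      d + ((pvClean l).count '(' : Int) - ((pvClean l).count ')' : Int) := by
  induction l using pvClean.induct with
  | case1 => intro d; simp [pvClean]
  | case2 r ih =>
    intro d
    have h1 : pvStepA (d, false, false) '"' = (d, true, false) := by simp [pvStepA]
    rw [pvClean, List.foldl_cons, h1, pvInString, ih]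
    simp
  | case3 c rest hq ih =>
    intro d
    by_cases hop : c = '('
    · subst hop
      have h1 : pvStepA (d, false, false) '(' = (d + 1, false, false) := by simp [pvStepA]
      rw [List.foldl_cons, h1, ih]
      rw [pvClean, if_neg hq]
      simp
      omega
    · by_cases hcl : c = ')'
      · subst hcl
        have h1 : pvStepA (d, false, false) ')' = (d - 1, false, false) := by simp [pvStepA]
        rw [List.foldl_cons, h1, ih]
        rw [pvClean, if_neg hq]
        simp
        omega
      · have h1 : pvStepA (d, false, false) c = (d, false, false) := by
          simp [pvStepA, hq, hop, hcl]
        rw [List.foldl_cons, h1, ih]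
        rw [pvClean, if_neg hq]
        simp [hop, hcl]

-- ===== VERDICT (by name: the statement is the Claim_ definition above) =====
theorem check_paren_balance_py_spec : Claim_equal_check_paren_balance_py := by
  intro text _
  show (text.toList.foldl pvStepA (0, false, false)).1 =
    (PySem.Str.count (String.ofList (pvClean text.toList)) "(" : Int) -
      (PySem.Str.count (String.ofList (pvClean text.toList)) ")" : Int)
  rw [pvMain,
    show ("(" : String) = String.ofList ['('] from rfl,
    show (")" : String) = String.ofList [')'] from rfl,
    pvStrCount_singleton, pvStrCount_singleton]
  simp
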